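-- pv_equiv track=rewrite | github.com/wulfebw/algorithms | scripts/search/radio_transmitters.py | find_component_edges
-- ===== SOURCE A (Python) =====
-- def find_component_edges(x,k):
--     edges = []
--     s = 0
--     for i in range(1, len(x)):
--         if x[i] - x[i-1] > k:
--             edges.append((s,i-1))
--             s = i
--     edges.append((s, len(x)-1))
--     return edges
-- ===== SOURCE B (Python) =====
-- def find_component_edges(x, k):
--     n = len(x)
--     if n <= 1:
--         return [(0, n - 1)]
--     m = n // 2
--     left = find_component_edges(x[:m], k)
--     right = [(s + m, e + m) for (s, e) in find_component_edges(x[m:], k)]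
--     if x[m] - x[m - 1] <= k:
--         return left[:-1] + [(left[-1][0], right[0][1])] + right[1:]
--     return left + right
-- ===== Notes on version B (the rewrite author's own statement) =====
-- stated objective: alternative
-- what changed: Replaces A's single left-to-right scan with a running start index by a divide-and-conquer recursion: split the array in half, compute each half's components independently, then merge the two boundary components if the junction gap is within k.
import Mathlib
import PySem

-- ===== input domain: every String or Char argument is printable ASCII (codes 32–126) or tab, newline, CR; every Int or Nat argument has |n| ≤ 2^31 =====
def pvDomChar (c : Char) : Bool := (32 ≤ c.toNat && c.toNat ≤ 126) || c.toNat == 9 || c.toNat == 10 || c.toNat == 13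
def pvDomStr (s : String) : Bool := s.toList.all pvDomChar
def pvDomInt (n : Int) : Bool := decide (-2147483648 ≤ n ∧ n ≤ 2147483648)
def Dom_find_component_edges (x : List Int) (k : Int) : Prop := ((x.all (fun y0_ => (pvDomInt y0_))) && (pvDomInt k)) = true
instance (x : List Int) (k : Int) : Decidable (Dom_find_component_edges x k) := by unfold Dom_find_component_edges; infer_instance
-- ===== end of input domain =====

-- B replaces A's single left-to-right scan (running start + conditional append) by a
-- divide-and-conquer recursion on halves with a merge at the junction (alternative, not faster).

-- ===== PORT A =====
def find_component_edges (x : List Int) (k : Int) : List (Int × Int) :=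
  let st := (PySem.List.pyRange 1 (x.length : Int) 1).foldl
    (fun (acc : List (Int × Int) × Int) i =>
      if PySem.List.pyGetD x i 0 - PySem.List.pyGetD x (i - 1) 0 > k
      then (acc.1 ++ [(acc.2, i - 1)], i) else acc) ([], 0)
  st.1 ++ [(st.2, (x.length : Int) - 1)]

-- ===== PORT B =====
-- x[:m] / x[m:] with 0 ≤ m ≤ len(x) are exactly List.take/List.drop; left/right are always
-- nonempty (proved below), so the getLastD/headD defaults are never used.
def find_component_edges_alt (x : List Int) (k : Int) : List (Int × Int) :=
  if x.length ≤ 1 then [(0, (x.length : Int) - 1)]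
  else
    let m := x.length / 2
    let left := find_component_edges_alt (x.take m) k
    let right := (find_component_edges_alt (x.drop m) k).map
      (fun p => (p.1 + (m : Int), p.2 + (m : Int)))
    if PySem.List.pyGetD x (m : Int) 0 - PySem.List.pyGetD x ((m : Int) - 1) 0 ≤ k then
      left.dropLast ++ [((left.getLastD (0, 0)).1, (right.headD (0, 0)).2)] ++ right.tail
    else left ++ right
termination_by x.length
decreasing_by all_goals (simp [List.length_take, List.length_drop]; omega)

-- ===== PRECONDITION & SPEC =====
def Spec_find_component_edges (x : List Int) (k : Int) (out : List (Int × Int)) : Prop := out = find_component_edges_alt x k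
instance (x : List Int) (k : Int) (out : List (Int × Int)) : Decidable (Spec_find_component_edges x k out) := by unfold Spec_find_component_edges; infer_instance

-- ===== CLAIM (what is proved, stated in full; the proofs are below) =====
def Claim_equal_find_component_edges : Prop := ∀ (x : List Int) (k : Int), Dom_find_component_edges x k → Spec_find_component_edges x k (find_component_edges x k)

-- ===== LEMMAS AND PROOFS =====

-- The canonical component list determined by a start, a break list and a final end.
def pvZipform (s : Int) (B : List Int) (e : Int) : List (Int × Int) :=
  match B with
  | [] => [(s, e)]
  | b :: B' => (s, b - 1) :: pvZipform b B' e

-- The break list of x: indices i in [1, len x) whose gap exceeds k.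
def pvBreaks (x : List Int) (k : Int) : List Int :=
  (PySem.List.pyRange 1 (x.length : Int) 1).filter
    (fun i => PySem.List.pyGetD x i 0 - PySem.List.pyGetD x (i - 1) 0 > k)

theorem pvZipform_ne_nil (s : Int) (B : List Int) (e : Int) : pvZipform s B e ≠ [] := by
  cases B <;> simp [pvZipform]

-- Invariant of A's loop: accumulated edges and running start after folding any index list.
theorem pvFoldInv (p : Int → Prop) [DecidablePred p] (I : List Int) :
    ∀ (edges : List (Int × Int)) (s : Int),
      I.foldl (fun (acc : List (Int × Int) × Int) i =>
          if p i then (acc.1 ++ [(acc.2, i - 1)], i) else acc) (edges, s)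
        = (edges ++ ((s :: I.filter (fun i => decide (p i))).zip
              ((I.filter (fun i => decide (p i))).map (fun b => b - 1))),
           (I.filter (fun i => decide (p i))).getLastD s) := by
  induction I with
  | nil => intro edges s; simp
  | cons i rest ih =>
    intro edges s
    by_cases h : p i
    · rw [List.foldl_cons, if_pos h, ih, List.filter_cons_of_pos (by simpa using h),
        List.map_cons, List.zip_cons_cons, List.getLastD_cons]
      simp
    · rw [List.foldl_cons, if_neg h, ih, List.filter_cons_of_neg (by simpa using h)]

theorem pvZipAux (e : Int) (B : List Int) :
    ∀ s : Int, (s :: B).zip (B.map (fun b => b - 1)) ++ [(B.getLastD s, e)]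
      = pvZipform s B e := by
  induction B with
  | nil => intro s; simp [pvZipform]
  | cons b B' ih =>
    intro s
    rw [List.map_cons, List.zip_cons_cons, List.getLastD_cons, pvZipform]
    simp [← ih b]

-- A computes the canonical form of its break list.
theorem pvA_eq (x : List Int) (k : Int) :
    find_component_edges x k = pvZipform 0 (pvBreaks x k) ((x.length : Int) - 1) := by
  simp only [find_component_edges]
  rw [pvFoldInv (fun i => PySem.List.pyGetD x i 0 - PySem.List.pyGetD x (i - 1) 0 > k)]
  simp only [pvBreaks]
  rw [List.nil_append]
  exact pvZipAux _ _ 0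

-- Splitting the canonical form at a break.
theorem pvSplit (e : Int) (B2 : List Int) (b : Int) :
    ∀ (B1 : List Int) (s : Int),
      pvZipform s (B1 ++ b :: B2) e = pvZipform s B1 (b - 1) ++ pvZipform b B2 e := by
  intro B1
  induction B1 with
  | nil => intro s; simp [pvZipform]
  | cons a B1' ih => intro s; simp [pvZipform, ih a]

-- Merging the canonical forms of the two halves when the junction is not a break.
theorem pvMerge (e : Int) (B2 : List Int) (m e1 : Int) :
    ∀ (B1 : List Int) (s : Int),
      pvZipform s (B1 ++ B2) e
        = (pvZipform s B1 e1).dropLast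
          ++ [(((pvZipform s B1 e1).getLastD (0, 0)).1, ((pvZipform m B2 e).headD (0, 0)).2)]
          ++ (pvZipform m B2 e).tail := by
  intro B1
  induction B1 with
  | nil =>
    intro s
    cases B2 with
    | nil => simp [pvZipform]
    | cons b B2' => simp [pvZipform]
  | cons a B1' ih =>
    intro s
    have h := pvZipform_ne_nil a B1' e1
    simp only [pvZipform, List.cons_append]
    rw [ih a, List.dropLast_cons_of_ne_nil h, List.getLastD_cons]
    cases hz : pvZipform a B1' e1 with
    | nil => exact absurd hz h
    | cons q qs => simp [List.getLastD]

-- Shifting the canonical form.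
theorem pvShift (m : Int) (B : List Int) (e : Int) :
    ∀ s : Int, (pvZipform s B e).map (fun p => (p.1 + m, p.2 + m))
      = pvZipform (s + m) (B.map (fun b => b + m)) (e + m) := by
  induction B with
  | nil => intro s; simp [pvZipform]
  | cons b B' ih =>
    intro s
    simp only [pvZipform, List.map_cons, ih b]
    congr 2
    ring

-- Indexing into a prefix / suffix.
theorem pvGetTake (x : List Int) (m : Nat) (j : Int) (h0 : 0 ≤ j) (hj : j < (m : Int))
    (hm : m ≤ x.length) :
    PySem.List.pyGetD (x.take m) j 0 = PySem.List.pyGetD x j 0 := by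
  have hl : (x.take m).length = m := by simp; omega
  rw [PySem.List.pyGetD_eq_getElem (x.take m) 0 h0 (by rw [hl]; exact_mod_cast hj),
      PySem.List.pyGetD_eq_getElem x 0 h0 (by omega)]
  rw [List.getElem_take]

theorem pvGetDrop (x : List Int) (m : Nat) (j : Int) (h0 : 0 ≤ j)
    (hj : j < (x.length : Int) - (m : Int)) :
    PySem.List.pyGetD (x.drop m) j 0 = PySem.List.pyGetD x (j + (m : Int)) 0 := by
  have hl : (x.drop m).length = x.length - m := by simp
  rw [PySem.List.pyGetD_eq_getElem (x.drop m) 0 h0 (by rw [hl]; omega),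
      PySem.List.pyGetD_eq_getElem x 0 (by omega) (by omega)]
  rw [List.getElem_drop]
  congr 1
  omega

-- Decomposition of the break list at the midpoint.
theorem pvBreaksSplit (x : List Int) (k : Int) (m : Nat) (h1 : 1 ≤ m) (h2 : m < x.length) :
    pvBreaks x k
      = pvBreaks (x.take m) k
        ++ ((if PySem.List.pyGetD x (m : Int) 0 - PySem.List.pyGetD x ((m : Int) - 1) 0 > k
            then [(m : Int)] else [])
          ++ (pvBreaks (x.drop m) k).map (fun b => b + (m : Int))) := by
  have hm1 : (1 : Int) ≤ (m : Int) := by exact_mod_cast h1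
  have hmn : (m : Int) < (x.length : Int) := by exact_mod_cast h2
  simp only [pvBreaks]
  rw [PySem.List.pyRange_one_append 1 (m : Int) (x.length : Int) hm1 (le_of_lt hmn),
      PySem.List.pyRange_one_cons hmn, ← List.singleton_append, List.filter_append,
      List.filter_append]
  congr 1
  · -- prefix part
    have hl : ((x.take m).length : Int) = (m : Int) := by simp; omega
    rw [hl]
    apply List.filter_congr
    intro i hi
    have hi' := (PySem.List.mem_pyRange_one).mp hi
    rw [pvGetTake x m i (by omega) (by omega) (le_of_lt h2),
        pvGetTake x m (i - 1) (by omega) (by omega) (le_of_lt h2)]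
  · congr 1
    · -- junction
      by_cases hgt : PySem.List.pyGetD x (m : Int) 0 - PySem.List.pyGetD x ((m : Int) - 1) 0 > k
      · rw [if_pos hgt, List.filter_singleton, decide_eq_true hgt, cond_true]
      · rw [if_neg hgt, List.filter_singleton, decide_eq_false hgt, cond_false]
    · -- suffix part
      have hl : ((x.drop m).length : Int) = (x.length : Int) - (m : Int) := by
        simp; omega
      rw [hl]
      have hrange : PySem.List.pyRange ((m : Int) + 1) (x.length : Int) 1
          = (PySem.List.pyRange 1 ((x.length : Int) - (m : Int)) 1).map
              (fun b => b + (m : Int)) := by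
        rw [PySem.List.pyRange_one, PySem.List.pyRange_one, List.map_map]
        have : ((x.length : Int) - ((m : Int) + 1)).toNat
            = ((x.length : Int) - (m : Int) - 1).toNat := by omega
        rw [this]
        apply List.map_congr_left
        intro a _
        simp
        ring
      rw [hrange, List.filter_map]
      congr 1
      apply List.filter_congr
      intro i hi
      have hi' := (PySem.List.mem_pyRange_one).mp hi
      simp only [Function.comp]
      rw [pvGetDrop x m i (by omega) (by omega),
          show i + (m : Int) - 1 = (i - 1) + (m : Int) by ring,
          pvGetDrop x m (i - 1) (by omega) (by omega)]

theorem pvB_eq (x : List Int) (k : Int) :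
    find_component_edges_alt x k = pvZipform 0 (pvBreaks x k) ((x.length : Int) - 1) := by
  by_cases h : x.length ≤ 1
  · rw [find_component_edges_alt, if_pos h]
    have : pvBreaks x k = [] := by
      simp only [pvBreaks]
      rw [PySem.List.pyRange_one_eq_nil (by exact_mod_cast h)]
      rfl
    rw [this, pvZipform]
  · have h2 : 2 ≤ x.length := by omega
    have hm1 : 1 ≤ x.length / 2 := by omega
    have hmn : x.length / 2 < x.length := by omega
    have IH1 := pvB_eq (x.take (x.length / 2)) k
    have IH2 := pvB_eq (x.drop (x.length / 2)) k
    rw [find_component_edges_alt, if_neg h]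
    simp only []
    have hlt : ((x.take (x.length / 2)).length : Int) = ((x.length / 2 : Nat) : Int) := by
      simp; omega
    have hld : ((x.drop (x.length / 2)).length : Int)
        = (x.length : Int) - ((x.length / 2 : Nat) : Int) := by simp; omega
    rw [IH1, IH2, hlt, hld, pvShift,
        pvBreaksSplit x k (x.length / 2) hm1 hmn]
    have he : (x.length : Int) - ((x.length / 2 : Nat) : Int) - 1 + ((x.length / 2 : Nat) : Int)
        = (x.length : Int) - 1 := by ring
    rw [he, zero_add]
    by_cases hc : PySem.List.pyGetD x ((x.length / 2 : Nat) : Int) 0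
        - PySem.List.pyGetD x (((x.length / 2 : Nat) : Int) - 1) 0 ≤ k
    · -- junction is not a break: merge the boundary components
      rw [if_pos hc, if_neg (by omega), List.nil_append]
      exact (pvMerge _ _ _ _ _ 0).symm
    · -- junction is a break: plain concatenation
      rw [if_neg hc, if_pos (by omega), List.singleton_append]
      exact (pvSplit _ _ _ _ 0).symm
termination_by x.length
decreasing_by all_goals (simp [List.length_take, List.length_drop]; omega)

-- ===== VERDICT (by name: the statement is the Claim_ definition above) =====
theorem find_component_edges_spec : Claim_equal_find_component_edges := by
  intro x k _
  show find_component_edges x k = find_component_edges_alt x k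
  rw [pvA_eq, pvB_eq]
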